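-- pv_equiv track=rewrite | github.com/osudrl/roadrunner | algo/cassiepede/benchmark/collect_data.py | create_range
-- ===== SOURCE A (Python) =====
-- def create_range(ids, size):
--     if ids is None:
--         return range(size)
--
--     ids = [_id.split('-') for _id in ids]
--
--     for i in range(len(ids)):
--         if len(ids[i]) == 1:
--             # Only specific benchmark is given
--             ids[i] = [int(ids[i][0])]
--         elif len(ids[i]) == 2:
--             # Range of benchmarks is given
--             if ids[i][0] == '':
--                 # Start of the range is not given
--                 ids[i] = range(int(ids[i][1]) + 1)
--             elif ids[i][1] == '':
--                 # End of the range is not given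
--                 ids[i] = range(int(ids[i][0]), size)
--             else:
--                 # Both start and end of the range are given
--                 ids[i] = range(int(ids[i][0]), int(ids[i][1]) + 1)
--         else:
--             raise ValueError(
--                 f"Invalid range specification: {ids[i]}. Should be either 'start-end' or 'start-' or '-end' or 'single'")
--
--     ids = sorted(list(set([i for _id in ids for i in _id if 0 <= i < size])))
--
--     return ids
-- ===== SOURCE B (Python) =====
-- def create_range(ids, size):
--     if ids is None:
--         return range(size)
--
--     # Turn each spec into a half-open interval clamped to [0, size); drop empty ones.
--     intervals = []
--     for spec in ids:
--         parts = spec.split('-')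
--         if len(parts) == 1:
--             lo, hi = int(parts[0]), int(parts[0]) + 1
--         elif len(parts) == 2:
--             if parts[0] == '':
--                 lo, hi = 0, int(parts[1]) + 1
--             elif parts[1] == '':
--                 lo, hi = int(parts[0]), size
--             else:
--                 lo, hi = int(parts[0]), int(parts[1]) + 1
--         else:
--             raise ValueError(
--                 f"Invalid range specification: {parts}. Should be either 'start-end' or 'start-' or '-end' or 'single'")
--         lo = max(lo, 0)
--         hi = min(hi, size)
--         if lo < hi:
--             intervals.append((lo, hi))
--
--     # Sort intervals by start, then sweep once, merging overlaps and emitting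
--     # each merged block directly — already sorted and duplicate-free.
--     intervals.sort(key=lambda iv: iv[0])
--     result = []
--     if intervals:
--         cur_lo, cur_hi = intervals[0]
--         for lo, hi in intervals[1:]:
--             if lo <= cur_hi:
--                 if hi > cur_hi:
--                     cur_hi = hi
--             else:
--                 result.extend(range(cur_lo, cur_hi))
--                 cur_lo, cur_hi = lo, hi
--         result.extend(range(cur_lo, cur_hi))
--     return result
-- ===== Notes on version B (the rewrite author's own statement) =====
-- stated objective: alternative
-- what changed: Instead of materializing every id of every spec, deduplicating through a set and sorting the elements, B turns each spec into a half-open interval clamped to [0,size), sorts the intervals by start and emits the merged blocks in one sweep, which is sorted and duplicate-free by construction.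
import Mathlib
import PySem

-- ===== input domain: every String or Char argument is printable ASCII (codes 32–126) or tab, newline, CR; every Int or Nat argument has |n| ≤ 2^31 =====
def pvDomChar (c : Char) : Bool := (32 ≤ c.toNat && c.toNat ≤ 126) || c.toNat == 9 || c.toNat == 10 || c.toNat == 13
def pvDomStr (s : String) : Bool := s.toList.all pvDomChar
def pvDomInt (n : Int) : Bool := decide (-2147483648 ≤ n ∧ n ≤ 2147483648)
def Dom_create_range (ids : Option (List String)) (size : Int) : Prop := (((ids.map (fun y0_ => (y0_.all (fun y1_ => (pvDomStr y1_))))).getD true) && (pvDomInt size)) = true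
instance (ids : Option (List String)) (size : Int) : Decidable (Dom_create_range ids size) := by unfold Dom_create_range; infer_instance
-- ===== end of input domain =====

-- B replaces A's materialize-all-ids/set/sort pipeline by clamped intervals sorted by start and
-- merged in one sweep (objective: alternative algorithm, same return value).

-- ===== PORT A =====
-- s.split('-'): split? is some for a nonempty separator, so getD never fires
def pvSplit (s : String) : List String := (PySem.Str.split? s "-").getD []

-- int(s), total under Pre_ (which guarantees every parse succeeds)
def pvIntOf (s : String) : Int := (PySem.Int.ofStr? s).getD 0

-- one spec expanded to its list of ids, exactly A's branch order
-- ('_ => [0]' stands for A's ValueError: outside Pre_, value arbitrary)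
def specExpandA (s : String) (size : Int) : List Int :=
  match pvSplit s with
  | [t] => [pvIntOf t]
  | [a, b] =>
      if a = "" then PySem.List.pyRange 0 (pvIntOf b + 1) 1
      else if b = "" then PySem.List.pyRange (pvIntOf a) size 1
      else PySem.List.pyRange (pvIntOf a) (pvIntOf b + 1) 1
  | _ => [0]

def create_range (ids : Option (List String)) (size : Int) : List Int :=
  match ids with
  | none => PySem.List.pyRange 0 size 1
  | some l =>
      let expanded := l.map (fun s => specExpandA s size)
      PySem.List.sorted
        (PySem.Set.ofList ((expanded.flatMap id).filter (fun i => decide (0 ≤ i) && decide (i < size))))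
        (fun x => x) false

-- ===== PORT B =====
-- one spec as a half-open interval (lo, hi), same branch order as Source B
-- ('_ => (0, 0)' stands for Source B's ValueError: outside Pre_, value arbitrary)
def specIntervalB (s : String) (size : Int) : Int × Int :=
  match pvSplit s with
  | [t] => (pvIntOf t, pvIntOf t + 1)
  | [a, b] =>
      if a = "" then (0, pvIntOf b + 1)
      else if b = "" then (pvIntOf a, size)
      else (pvIntOf a, pvIntOf b + 1)
  | _ => (0, 0)

def clampB (size : Int) (iv : Int × Int) : Int × Int := (max iv.1 0, min iv.2 size)

-- the sweep of Source B: current block (lo, hi), remaining start-sorted intervals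
def emitMerge (lo hi : Int) : List (Int × Int) → List Int
  | [] => PySem.List.pyRange lo hi 1
  | (l, h) :: rest =>
      if l ≤ hi then emitMerge lo (if h > hi then h else hi) rest
      else PySem.List.pyRange lo hi 1 ++ emitMerge l h rest

def create_range_alt (ids : Option (List String)) (size : Int) : List Int :=
  match ids with
  | none => PySem.List.pyRange 0 size 1
  | some l =>
      let intervals := (l.map (fun s => clampB size (specIntervalB s size))).filter
        (fun iv => decide (iv.1 < iv.2))
      match PySem.List.sorted intervals (fun iv => iv.1) false with
      | [] => []
      | (lo, hi) :: rest => emitMerge lo hi rest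

-- ===== PRECONDITION & SPEC =====
-- spec parses without ValueError: 1 or 2 '-'-separated tokens, each needed int() succeeding
def specOK (s : String) : Bool :=
  match pvSplit s with
  | [t] => (PySem.Int.ofStr? t).isSome
  | [a, b] =>
      if a = "" then (PySem.Int.ofStr? b).isSome
      else if b = "" then (PySem.Int.ofStr? a).isSome
      else (PySem.Int.ofStr? a).isSome && (PySem.Int.ofStr? b).isSome
  | _ => false

-- exactly the inputs on which Python A returns (elsewhere A raises ValueError, and so does B)
def Pre_create_range (ids : Option (List String)) (size : Int) : Prop :=
  ((ids.getD []).all specOK) = true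
instance (ids : Option (List String)) (size : Int) : Decidable (Pre_create_range ids size) := by
  unfold Pre_create_range; infer_instance

def pvWitness_create_range : Option (List String) × Int := (some ["1-3", "7", "-2", "5-"], 10)

def Spec_create_range (ids : Option (List String)) (size : Int) (out : List Int) : Prop := out = create_range_alt ids size
instance (ids : Option (List String)) (size : Int) (out : List Int) : Decidable (Spec_create_range ids size out) := by unfold Spec_create_range; infer_instance

-- ===== CLAIM (what is proved, stated in full; the proofs are below) =====
def Claim_equal_create_range : Prop := ∀ (ids : Option (List String)) (size : Int), Dom_create_range ids size → Pre_create_range ids size → Spec_create_range ids size (create_range ids size)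

-- ===== LEMMAS AND PROOFS =====

-- membership in the sweep's output, for start-sorted remaining intervals
theorem mem_emitMerge (lo hi : Int) (ivs : List (Int × Int)) (x : Int)
    (h1 : ∀ p ∈ ivs, lo ≤ p.1) (h2 : ivs.Pairwise (fun a b => a.1 ≤ b.1)) :
    x ∈ emitMerge lo hi ivs ↔ (lo ≤ x ∧ x < hi) ∨ ∃ p ∈ ivs, p.1 ≤ x ∧ x < p.2 := by
  induction ivs generalizing lo hi with
  | nil => simp [emitMerge, PySem.List.mem_pyRange_one]
  | cons p rest ih =>
      obtain ⟨l, h⟩ := p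
      have hl : lo ≤ l := h1 (l, h) (by simp)
      have h1' : ∀ q ∈ rest, lo ≤ q.1 := fun q hq => h1 q (List.mem_cons_of_mem _ hq)
      have h1'' : ∀ q ∈ rest, l ≤ q.1 := fun q hq => (List.pairwise_cons.mp h2).1 q hq
      have h2' := (List.pairwise_cons.mp h2).2
      simp only [emitMerge]
      by_cases hle : l ≤ hi
      · rw [if_pos hle, show (if h > hi then h else hi) = max hi h from by split_ifs <;> omega,
          ih lo (max hi h) h1' h2']
        constructor
        · rintro (hc | ⟨q, hq, hc⟩)
          · by_cases hx : x < hi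
            · exact Or.inl ⟨hc.1, hx⟩
            · exact Or.inr ⟨(l, h), by simp, by show l ≤ x ∧ x < h; omega⟩
          · exact Or.inr ⟨q, List.mem_cons_of_mem _ hq, hc⟩
        · rintro (hc | ⟨q, hq, hc⟩)
          · exact Or.inl ⟨hc.1, by omega⟩
          · rcases List.mem_cons.mp hq with heq | hq'
            · rw [heq] at hc
              have hc' : l ≤ x ∧ x < h := hc
              exact Or.inl ⟨by omega, by omega⟩
            · exact Or.inr ⟨q, hq', hc⟩
      · rw [if_neg hle, List.mem_append, PySem.List.mem_pyRange_one, ih l h h1'' h2']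
        constructor
        · rintro (hc | hc | ⟨q, hq, hc⟩)
          · exact Or.inl hc
          · exact Or.inr ⟨(l, h), by simp, hc⟩
          · exact Or.inr ⟨q, List.mem_cons_of_mem _ hq, hc⟩
        · rintro (hc | ⟨q, hq, hc⟩)
          · exact Or.inl hc
          · rcases List.mem_cons.mp hq with heq | hq'
            · rw [heq] at hc
              exact Or.inr (Or.inl hc)
            · exact Or.inr (Or.inr ⟨q, hq', hc⟩)

theorem pairwise_emitMerge (lo hi : Int) (ivs : List (Int × Int))
    (h1 : ∀ p ∈ ivs, lo ≤ p.1) (h2 : ivs.Pairwise (fun a b => a.1 ≤ b.1)) :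
    (emitMerge lo hi ivs).Pairwise (· < ·) := by
  induction ivs generalizing lo hi with
  | nil => exact PySem.List.pairwise_lt_pyRange_one _ _
  | cons p rest ih =>
      obtain ⟨l, h⟩ := p
      have hl : lo ≤ l := h1 (l, h) (by simp)
      have h1' : ∀ q ∈ rest, lo ≤ q.1 := fun q hq => h1 q (List.mem_cons_of_mem _ hq)
      have h1'' : ∀ q ∈ rest, l ≤ q.1 := fun q hq => (List.pairwise_cons.mp h2).1 q hq
      have h2' := (List.pairwise_cons.mp h2).2
      simp only [emitMerge]
      by_cases hle : l ≤ hi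
      · rw [if_pos hle]
        exact ih lo _ h1' h2'
      · rw [if_neg hle]
        refine List.pairwise_append.mpr ⟨PySem.List.pairwise_lt_pyRange_one _ _, ih l h h1'' h2', ?_⟩
        intro a ha b hb
        have ha' : a < hi := (PySem.List.mem_pyRange_one.mp ha).2
        have hb' : l ≤ b := by
          rcases (mem_emitMerge l h rest b h1'' h2').mp hb with ⟨c, _⟩ | ⟨q, hq, hc, _⟩
          · exact c
          · exact le_trans (h1'' q hq) hc
        omega

-- per-spec: A's filtered ids are exactly the points of B's clamped interval
theorem spec_point_iff (s : String) (size x : Int) (hok : specOK s = true) :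
    (x ∈ specExpandA s size ∧ 0 ≤ x ∧ x < size) ↔
    ((clampB size (specIntervalB s size)).1 ≤ x ∧ x < (clampB size (specIntervalB s size)).2) := by
  unfold specOK at hok
  unfold specExpandA specIntervalB
  rcases hsp : pvSplit s with _ | ⟨a, _ | ⟨b, _ | _⟩⟩ <;> rw [hsp] at hok
  · simp at hok
  · simp only [clampB, List.mem_singleton]
    omega
  · simp only [clampB]
    split_ifs <;> simp only [PySem.List.mem_pyRange_one] <;> omega
  · simp at hok

theorem create_range_eq (ids : Option (List String)) (size : Int)
    (hpre : Pre_create_range ids size) : create_range ids size = create_range_alt ids size := by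
  cases ids with
  | none => rfl
  | some l =>
      unfold Pre_create_range at hpre
      simp only [Option.getD, List.all_eq_true] at hpre
      simp only [create_range, create_range_alt]
      set ivs := (l.map (fun s => clampB size (specIntervalB s size))).filter
        (fun iv => decide (iv.1 < iv.2)) with hivs
      -- x in a clamped nonempty interval ↔ x among A's filtered ids
      have hmemiv : ∀ x : Int, (∃ p ∈ ivs, p.1 ≤ x ∧ x < p.2) ↔
          x ∈ ((l.map (fun s => specExpandA s size)).flatMap id).filter
            (fun i => decide (0 ≤ i) && decide (i < size)) := by
        intro x
        simp only [hivs, List.mem_filter, List.mem_map, List.mem_flatMap, id_eq,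
          decide_eq_true_eq, Bool.and_eq_true]
        constructor
        · rintro ⟨p, ⟨⟨s, hs, rfl⟩, _⟩, hc⟩
          have hx := (spec_point_iff s size x (hpre s hs)).mpr hc
          exact ⟨⟨_, ⟨s, hs, rfl⟩, hx.1⟩, hx.2.1, hx.2.2⟩
        · rintro ⟨⟨_, ⟨s, hs, rfl⟩, hx⟩, hx0, hxs⟩
          have hc := (spec_point_iff s size x (hpre s hs)).mp ⟨hx, hx0, hxs⟩
          exact ⟨_, ⟨⟨s, hs, rfl⟩, by omega⟩, hc⟩
      -- properties of the sorted interval list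
      have hsp : (PySem.List.sorted ivs (fun iv => iv.1) false).Pairwise (fun a b => a.1 ≤ b.1) :=
        PySem.List.sorted_pairwise ivs _
      have hsm : ∀ p : Int × Int, p ∈ PySem.List.sorted ivs (fun iv => iv.1) false ↔ p ∈ ivs :=
        fun p => PySem.List.mem_sorted ivs _ false p
      rcases hsrt : PySem.List.sorted ivs (fun iv => iv.1) false with _ | ⟨⟨lo, hi⟩, rest⟩
      · -- sorted is nil → ivs is nil → A's filtered list is empty too
        have hnil : ivs = [] := (PySem.List.sorted_eq_nil_iff ivs _ false).mp hsrt
        have hflt : ((l.map (fun s => specExpandA s size)).flatMap id).filter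
            (fun i => decide (0 ≤ i) && decide (i < size)) = [] := by
          rcases hf : ((l.map (fun s => specExpandA s size)).flatMap id).filter
              (fun i => decide (0 ≤ i) && decide (i < size)) with _ | ⟨y, ys⟩
          · rfl
          · exfalso
            have hy : ∃ p ∈ ivs, p.1 ≤ y ∧ y < p.2 := (hmemiv y).mpr (by rw [hf]; simp)
            rw [hnil] at hy; simp at hy
        rw [hflt]; rfl
      · rw [hsrt] at hsp hsm
        have h1 : ∀ p ∈ rest, lo ≤ p.1 := fun p hp => (List.pairwise_cons.mp hsp).1 p hp
        have h2 := (List.pairwise_cons.mp hsp).2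
        have hpw : (emitMerge lo hi rest).Pairwise (· < ·) := pairwise_emitMerge lo hi rest h1 h2
        have hmem : ∀ x : Int, x ∈ emitMerge lo hi rest ↔
            x ∈ PySem.Set.ofList (((l.map (fun s => specExpandA s size)).flatMap id).filter
              (fun i => decide (0 ≤ i) && decide (i < size))) := by
          intro x
          rw [PySem.Set.mem_ofList, ← hmemiv x, mem_emitMerge lo hi rest x h1 h2]
          constructor
          · rintro (hc | ⟨q, hq, hc⟩)
            · exact ⟨(lo, hi), (hsm _).mp (by simp), hc⟩
            · exact ⟨q, (hsm q).mp (List.mem_cons_of_mem _ hq), hc⟩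
          · rintro ⟨q, hq, hc⟩
            rcases List.mem_cons.mp ((hsm q).mpr hq) with heq | hq'
            · rw [heq] at hc; exact Or.inl hc
            · exact Or.inr ⟨q, hq', hc⟩
        have hperm : (emitMerge lo hi rest).Perm (PySem.Set.ofList
            (((l.map (fun s => specExpandA s size)).flatMap id).filter
              (fun i => decide (0 ≤ i) && decide (i < size)))) := by
          refine (List.perm_ext_iff_of_nodup ?_ (PySem.Set.nodup_ofList _)).mpr hmem
          exact hpw.imp (fun h => ne_of_lt h)
        exact PySem.List.sorted_eq_of_perm_of_pairwise_lt _ _ _ hperm hpw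

-- ===== VERDICT (by name: the statement is the Claim_ definition above) =====
theorem create_range_spec : Claim_equal_create_range := by
  intro ids size _ hpre
  unfold Spec_create_range
  exact create_range_eq ids size hpre
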